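-- pv_equiv track=rewrite | github.com/IOKernel/cryptopals | careless_padding/dist/chal.py | find_repeat_tail
-- ===== SOURCE A (Python) =====
-- def find_repeat_tail(message):
--     Y = message[-1]
--     message_len = len(message)
--     for i in range(len(message)-1, -1, -1):
--         if message[i] != Y:
--             X = message[i]
--             message_len = i + 1
--             break
--     return message_len, X, Y
-- ===== SOURCE B (Python) =====
-- def find_repeat_tail(message):
--     Y = message[-1]
--     message_len = len(message)
--     for i, v in enumerate(message):
--         if v != Y:
--             X = v
--             message_len = i + 1
--     return message_len, X, Y
-- ===== Notes on version B (the rewrite author's own statement) =====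
-- stated objective: alternative
-- what changed: Replaces A's backward index loop with break-on-first-mismatch by a single forward enumerate pass that keeps the last mismatching element and its index.
import Mathlib
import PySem

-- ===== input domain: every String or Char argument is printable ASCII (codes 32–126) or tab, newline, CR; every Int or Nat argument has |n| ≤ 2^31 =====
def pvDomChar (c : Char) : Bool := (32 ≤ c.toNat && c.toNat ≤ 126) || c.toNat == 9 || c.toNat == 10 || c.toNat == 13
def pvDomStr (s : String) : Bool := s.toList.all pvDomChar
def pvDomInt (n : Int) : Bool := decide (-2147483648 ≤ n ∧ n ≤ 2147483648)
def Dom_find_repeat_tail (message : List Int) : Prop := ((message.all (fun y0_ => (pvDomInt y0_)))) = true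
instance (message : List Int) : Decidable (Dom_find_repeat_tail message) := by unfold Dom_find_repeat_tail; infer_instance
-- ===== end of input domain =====

-- B replaces A's backward break-on-first-mismatch index loop with a single forward
-- enumerate pass keeping the last mismatching element and its index (alternative decomposition, same cost).


-- ===== PORT A =====
-- A's 'for i in range(len(message)-1, -1, -1): if message[i] != Y: …; break'
-- as structural recursion over the countdown range list; early exit = returning some.
def pvALoop (message : List Int) (Y : Int) : List Int → Option (Int × Int)
  | [] => none
  | i :: rest =>
    match PySem.List.pyGet? message i with
    | none => none                    -- IndexError: unreachable, indices come from range(len-1,-1,-1)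
    | some v => if v ≠ Y then some (i + 1, v) else pvALoop message Y rest

def find_repeat_tail (message : List Int) : Int × Int × Int :=
  match PySem.List.pyGet? message (-1) with
  | none => (0, 0, 0)                 -- Python: IndexError on empty message (excluded by Pre_)
  | some Y =>
    match pvALoop message Y (PySem.List.pyRange ((message.length : Int) - 1) (-1) (-1)) with
    | some (len, X) => (len, X, Y)
    | none => ((message.length : Int), 0, 0)   -- Python: UnboundLocalError, X never set (excluded by Pre_)

-- ===== PORT B =====
-- B's forward pass: state (message_len, X?) updated at every mismatching element.
def pvBStep (Y : Int) (s : Int × Option Int) (p : Int × Int) : Int × Option Int :=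
  if p.2 ≠ Y then (p.1 + 1, some p.2) else s

def find_repeat_tail_alt (message : List Int) : Int × Int × Int :=
  match PySem.List.pyGet? message (-1) with
  | none => (0, 0, 0)                 -- Python: IndexError on empty message (excluded by Pre_)
  | some Y =>
    let st := (PySem.List.enumerate message 0).foldl (pvBStep Y) ((message.length : Int), none)
    match st.2 with
    | some X => (st.1, X, Y)
    | none => ((message.length : Int), 0, 0)   -- Python: UnboundLocalError, X never set (excluded by Pre_)

-- ===== PRECONDITION & SPEC =====
-- Pre_ excludes exactly the inputs where the Python A raises: the empty list (IndexError on
-- message[-1]) and lists whose elements all equal the last one (X unbound -> UnboundLocalError).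
-- B raises the same exceptions there.
def Pre_find_repeat_tail (message : List Int) : Prop :=
  message ≠ [] ∧ ∃ x ∈ message, x ≠ message.getLastD 0
instance (message : List Int) : Decidable (Pre_find_repeat_tail message) := by
  unfold Pre_find_repeat_tail; infer_instance

def pvWitness_find_repeat_tail : List Int := [1, 2, 2]

def Spec_find_repeat_tail (message : List Int) (out : Int × Int × Int) : Prop := out = find_repeat_tail_alt message
instance (message : List Int) (out : Int × Int × Int) : Decidable (Spec_find_repeat_tail message out) := by unfold Spec_find_repeat_tail; infer_instance

-- ===== CLAIM (what is proved, stated in full; the proofs are below) =====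
def Claim_equal_find_repeat_tail : Prop := ∀ (message : List Int), Dom_find_repeat_tail message → Pre_find_repeat_tail message → Spec_find_repeat_tail message (find_repeat_tail message)

-- ===== LEMMAS AND PROOFS =====

-- enumerate of a snoc appends the final indexed pair
theorem pv_enumerate_append (xs : List Int) (a : Int) (s : Int) :
    PySem.List.enumerate (xs ++ [a]) s
      = PySem.List.enumerate xs s ++ [(s + (xs.length : Int), a)] := by
  induction xs generalizing s with
  | nil => simp [PySem.List.enumerate]
  | cons x xs ih =>
      simp [PySem.List.enumerate_cons, ih (s + 1)]
      ring_nf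

-- A's backward scan ignores a trailing element it never indexes
theorem pv_aLoop_append (l : List Int) (a Y : Int) (r : List Int)
    (hr : ∀ i ∈ r, 0 ≤ i ∧ i < (l.length : Int)) :
    pvALoop (l ++ [a]) Y r = pvALoop l Y r := by
  induction r with
  | nil => rfl
  | cons i rest ih =>
      have hi := hr i (by simp)
      have hget : PySem.List.pyGet? (l ++ [a]) i = PySem.List.pyGet? l i := by
        rw [PySem.List.pyGet?_of_nonneg _ hi.1, PySem.List.pyGet?_of_nonneg _ hi.1]
        have : i.toNat < l.length := by omega
        rw [List.getElem?_append_left this]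
      simp only [pvALoop, hget]
      cases PySem.List.pyGet? l i with
      | none => rfl
      | some v =>
          by_cases hv : v = Y
          · simp [hv, ih (fun j hj => hr j (by simp [hj]))]
          · simp [hv]

-- the central correspondence: B's forward fold computes exactly what A's backward scan finds
theorem pv_key (l : List Int) (Y : Int) (s : Int × Option Int) :
    (PySem.List.enumerate l 0).foldl (pvBStep Y) s
      = match pvALoop l Y (PySem.List.pyRange ((l.length : Int) - 1) (-1) (-1)) with
        | some (len, X) => (len, some X)
        | none => s := by
  induction l using List.reverseRecOn generalizing s with
  | nil => simp [PySem.List.enumerate, PySem.List.pyRange_neg_one_eq_nil, pvALoop]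
  | append_singleton l a ih =>
      have hlen : ((l ++ [a]).length : Int) - 1 = (l.length : Int) := by simp
      have hcons : PySem.List.pyRange ((l.length : Int)) (-1) (-1)
          = (l.length : Int) :: PySem.List.pyRange ((l.length : Int) - 1) (-1) (-1) := by
        exact PySem.List.pyRange_neg_one_cons (by omega)
      have hget : PySem.List.pyGet? (l ++ [a]) ((l.length : Int)) = some a := by
        exact PySem.List.pyGet?_append_length l [] a
      rw [pv_enumerate_append, List.foldl_append, hlen, hcons]
      simp only [pvALoop, hget, List.foldl_cons, List.foldl_nil]
      by_cases ha : a = Y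
      · subst ha
        have hrest : pvALoop (l ++ [a]) a (PySem.List.pyRange ((l.length : Int) - 1) (-1) (-1))
            = pvALoop l a (PySem.List.pyRange ((l.length : Int) - 1) (-1) (-1)) := by
          apply pv_aLoop_append
          intro i hi
          have := (PySem.List.mem_pyRange_neg_one).mp hi
          omega
        rw [if_neg (by simp), hrest, ih s]
        cases h : pvALoop l a (PySem.List.pyRange ((l.length : Int) - 1) (-1) (-1)) with
        | none => simp [pvBStep]
        | some p => cases p; simp [pvBStep]
      · simp [ha, pvBStep]

theorem find_repeat_tail_spec_aux (message : List Int) :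
    find_repeat_tail message = find_repeat_tail_alt message := by
  unfold find_repeat_tail find_repeat_tail_alt
  cases hY : PySem.List.pyGet? message (-1) with
  | none => rfl
  | some Y =>
      simp only [pv_key message Y ((message.length : Int), none)]
      cases h : pvALoop message Y (PySem.List.pyRange ((message.length : Int) - 1) (-1) (-1)) with
      | none => simp
      | some p => cases p; simp

-- ===== VERDICT (by name: the statement is the Claim_ definition above) =====
theorem find_repeat_tail_spec : Claim_equal_find_repeat_tail := by
  intro message _ _
  unfold Spec_find_repeat_tail
  exact find_repeat_tail_spec_aux message
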